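-- pv_equiv track=rewrite | github.com/microscaler/BRRTRouter | tooling/src/brrtrouter_tooling/mcp/tools.py | _build_conformance_report
-- ===== SOURCE A (Python) =====
-- def _build_conformance_report(
--     errors: list[str],
--     warnings: list[str],
--     suggestions: list[str],
-- ) -> str:
--     """Format errors, warnings, and suggestions into a readable report."""
--     lines: list[str] = []
--     if errors:
--         lines.append(f"❌ Errors ({len(errors)}):")
--         lines.extend(f"  - {e}" for e in errors)
--     if warnings:
--         lines.append(f"⚠️  Warnings ({len(warnings)}):")
--         lines.extend(f"  - {w}" for w in warnings)
--     if suggestions: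
--         lines.append(f"💡 Suggestions ({len(suggestions)}):")
--         lines.extend(f"  - {s}" for s in suggestions)
--     if not lines:
--         return "✅ Spec is fully conformant with BRRTRouter requirements."
--     return "\n".join(lines)
-- ===== SOURCE B (Python) =====
-- def _build_conformance_report(
--     errors: list[str],
--     warnings: list[str],
--     suggestions: list[str],
-- ) -> str:
--     """Format errors, warnings, and suggestions into a readable report."""
--
--     def prepend(header: str, items: list[str], rest):
--         """Prepend a section block for ``items`` (if any) onto ``rest``."""
--         if not items:
--             return rest
--         block = header
--         for item in items:
--             block += "\n  - " + item
--         return block if rest is None else block + "\n" + rest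
--
--     report = None
--     report = prepend(f"\U0001f4a1 Suggestions ({len(suggestions)}):", suggestions, report)
--     report = prepend(f"\u26a0\ufe0f  Warnings ({len(warnings)}):", warnings, report)
--     report = prepend(f"\u274c Errors ({len(errors)}):", errors, report)
--     if report is None:
--         return "\u2705 Spec is fully conformant with BRRTRouter requirements."
--     return report
-- ===== Notes on version B (the rewrite author's own statement) =====
-- stated objective: alternative
-- what changed: Instead of collecting a flat list of lines and '\n'.join-ing it, B builds the report string directly back-to-front through an Optional-string accumulator: a helper prepends each section's block (header plus bullets concatenated by string +=) onto the report, and None at the end signals the conformant message.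
import Mathlib
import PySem

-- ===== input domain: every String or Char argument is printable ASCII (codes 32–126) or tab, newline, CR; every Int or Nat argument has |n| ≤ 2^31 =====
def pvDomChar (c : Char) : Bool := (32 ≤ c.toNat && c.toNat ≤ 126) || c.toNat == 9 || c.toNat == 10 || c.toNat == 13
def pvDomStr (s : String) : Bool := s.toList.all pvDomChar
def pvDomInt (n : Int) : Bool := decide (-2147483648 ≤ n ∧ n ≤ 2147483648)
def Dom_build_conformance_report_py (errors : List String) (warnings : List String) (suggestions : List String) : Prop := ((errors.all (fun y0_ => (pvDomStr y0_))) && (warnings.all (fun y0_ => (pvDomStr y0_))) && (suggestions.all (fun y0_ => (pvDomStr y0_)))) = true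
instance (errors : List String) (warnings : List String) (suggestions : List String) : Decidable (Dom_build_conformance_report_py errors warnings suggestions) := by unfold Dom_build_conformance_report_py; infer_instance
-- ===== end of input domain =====

-- B builds the report string directly back-to-front via an Option-string accumulator (no line list, no join); alternative decomposition, same cost. 


-- ===== PORT A =====
def build_conformance_report_py (errors : List String) (warnings : List String) (suggestions : List String) : String :=
  let lines : List String := []
  let lines := if errors ≠ [] then
      lines ++ (("❌ Errors (" ++ toString errors.length ++ "):") :: errors.map (fun e => "  - " ++ e))
    else lines
  let lines := if warnings ≠ [] then
      lines ++ (("⚠️  Warnings (" ++ toString warnings.length ++ "):") :: warnings.map (fun w => "  - " ++ w))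
    else lines
  let lines := if suggestions ≠ [] then
      lines ++ (("💡 Suggestions (" ++ toString suggestions.length ++ "):") :: suggestions.map (fun s => "  - " ++ s))
    else lines
  if lines = [] then "✅ Spec is fully conformant with BRRTRouter requirements."
  else PySem.Str.join "\n" lines

-- ===== PORT B =====
-- helper 'prepend' of Source B: prepend a section block (header plus '+='-built bullets) onto the optional report
def bcr_prepend (header : String) (items : List String) (rest : Option String) : Option String :=
  if items = [] then rest
  else
    let block := items.foldl (fun b item => b ++ "\n  - " ++ item) header
    match rest with
    | none => some block
    | some r => some (block ++ "\n" ++ r)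

def build_conformance_report_py_alt (errors : List String) (warnings : List String) (suggestions : List String) : String :=
  let report : Option String := none
  let report := bcr_prepend ("💡 Suggestions (" ++ toString suggestions.length ++ "):") suggestions report
  let report := bcr_prepend ("⚠️  Warnings (" ++ toString warnings.length ++ "):") warnings report
  let report := bcr_prepend ("❌ Errors (" ++ toString errors.length ++ "):") errors report
  match report with
  | none => "✅ Spec is fully conformant with BRRTRouter requirements."
  | some r => r

-- ===== PRECONDITION & SPEC =====
def Spec_build_conformance_report_py (errors : List String) (warnings : List String) (suggestions : List String) (out : String) : Prop := out = build_conformance_report_py_alt errors warnings suggestions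
instance (errors : List String) (warnings : List String) (suggestions : List String) (out : String) : Decidable (Spec_build_conformance_report_py errors warnings suggestions out) := by unfold Spec_build_conformance_report_py; infer_instance

-- ===== CLAIM (what is proved, stated in full; the proofs are below) =====
def Claim_equal_build_conformance_report_py : Prop := ∀ (errors : List String) (warnings : List String) (suggestions : List String), Dom_build_conformance_report_py errors warnings suggestions → Spec_build_conformance_report_py errors warnings suggestions (build_conformance_report_py errors warnings suggestions)

-- ===== LEMMAS AND PROOFS =====

theorem sjoin_singleton (sep a : String) : PySem.Str.join sep [a] = a := by
  simp [PySem.Str.join, PySem.Chars.join, List.intercalate]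

theorem sjoin_cons_cons (sep a b : String) (t : List String) :
    PySem.Str.join sep (a :: b :: t) = a ++ sep ++ PySem.Str.join sep (b :: t) := by
  simp [PySem.Str.join, PySem.Chars.join, List.intercalate, String.append_assoc]

-- pulling a prefix out of Source B's bullet-accumulating foldl
theorem bcr_foldl_pull (xs : List String) (p q : String) :
    xs.foldl (fun b item => b ++ "\n  - " ++ item) (p ++ q)
      = p ++ xs.foldl (fun b item => b ++ "\n  - " ++ item) q := by
  induction xs generalizing q with
  | nil => rfl
  | cons x xs ih =>
      have h : p ++ q ++ "\n  - " ++ x = p ++ (q ++ "\n  - " ++ x) := by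
        simp [String.append_assoc]
      simp only [List.foldl_cons]
      rw [h, ih]

-- A's joined section equals B's foldl-built block
theorem bcr_block_eq (items : List String) (header : String) :
    PySem.Str.join "\n" (header :: items.map (fun e => "  - " ++ e))
      = items.foldl (fun b item => b ++ "\n  - " ++ item) header := by
  induction items generalizing header with
  | nil => exact sjoin_singleton _ _
  | cons x xs ih =>
      have hlit : ("\n  - " : String) = "\n" ++ "  - " := by decide
      have h2 : header ++ "\n  - " ++ x = header ++ "\n" ++ ("  - " ++ x) := by
        rw [hlit, ← String.append_assoc, String.append_assoc]
      rw [List.map_cons, sjoin_cons_cons, ih ("  - " ++ x), List.foldl_cons, h2,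
          bcr_foldl_pull xs (header ++ "\n") ("  - " ++ x)]

-- join over the concatenation of two nonempty line blocks
theorem sjoin_append (xs ys : List String) (hx : xs ≠ []) (hy : ys ≠ []) :
    PySem.Str.join "\n" (xs ++ ys)
      = PySem.Str.join "\n" xs ++ "\n" ++ PySem.Str.join "\n" ys := by
  induction xs with
  | nil => exact absurd rfl hx
  | cons a xs ih =>
      cases xs with
      | nil =>
          cases ys with
          | nil => exact absurd rfl hy
          | cons b t => simp [sjoin_cons_cons, sjoin_singleton]
      | cons c t =>
          have h := ih (by simp)
          simp only [List.cons_append] at h ⊢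
          rw [sjoin_cons_cons, h, sjoin_cons_cons]
          simp [String.append_assoc]

-- a section block followed by further report lines (next header r :: rs)
theorem sjoin_block_prepend (header r : String) (items rs : List String) :
    PySem.Str.join "\n" (header :: (items.map (fun e => "  - " ++ e) ++ r :: rs))
      = items.foldl (fun b item => b ++ "\n  - " ++ item) header ++ "\n" ++ PySem.Str.join "\n" (r :: rs) := by
  rw [show header :: (items.map (fun e => "  - " ++ e) ++ r :: rs)
        = (header :: items.map (fun e => "  - " ++ e)) ++ r :: rs from rfl,
      sjoin_append _ _ (by simp) (by simp), bcr_block_eq]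

-- ===== VERDICT (by name: the statement is the Claim_ definition above) =====
theorem build_conformance_report_py_spec : Claim_equal_build_conformance_report_py := by
  intro errors warnings suggestions _
  unfold Spec_build_conformance_report_py build_conformance_report_py build_conformance_report_py_alt bcr_prepend
  by_cases he : errors = [] <;> by_cases hw : warnings = [] <;> by_cases hs : suggestions = [] <;>
    simp only [he, hw, hs, not_true, not_false_iff, ne_eq, ite_true, ite_false,
      List.nil_append, List.cons_append, List.cons_ne_nil, List.append_assoc] <;>
    try rfl
  all_goals try simp only [sjoin_block_prepend, bcr_block_eq]
  all_goals simp only [String.append_assoc]
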